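-- pv_equiv track=rewrite | github.com/louiechiu137/SKILLS | cisco-log-to-json-parsing/parse_switch_logs.py | choose_management_ip
-- ===== SOURCE A (Python) =====
-- def choose_management_ip(ip_interfaces: list[dict]) -> str | None:
--     candidates = [
--         iface
--         for iface in ip_interfaces
--         if iface.get("ip_address")
--         and iface["ip_address"].lower() not in {"unassigned", "0.0.0.0"}
--     ]
--     if not candidates:
--         return None
--
--     def score(entry: dict) -> tuple[int, int]:
--         name = entry.get("interface", "").lower()
--         status = entry.get("status", "").lower()
--         status_rank = 0 if status.startswith("up") else 1
--         if name in {"mgmt0", "management0"}: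
--             return (0, status_rank)
--         if name.startswith("vlan102"):
--             return (1, status_rank)
--         if name.startswith("vlan1"):
--             return (2, status_rank)
--         if name.startswith("vlan"):
--             return (3, status_rank)
--         return (4, status_rank)
--
--     return sorted(candidates, key=score)[0].get("ip_address")
-- ===== SOURCE B (Python) =====
-- def choose_management_ip(ip_interfaces: list[dict]) -> str | None:
--     def is_candidate(e):
--         ip = e.get("ip_address")
--         if not ip:
--             return False
--         low = ip.lower()
--         return low != "unassigned" and low != "0.0.0.0"
--
--     def tier(e):
--         name = e.get("interface", "").lower()
--         if name == "mgmt0" or name == "management0":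
--             return 0
--         if name.startswith("vlan102"):
--             return 1
--         if name.startswith("vlan1"):
--             return 2
--         if name.startswith("vlan"):
--             return 3
--         return 4
--
--     def is_up(e):
--         return e.get("status", "").lower().startswith("up")
--
--     candidates = [e for e in ip_interfaces if is_candidate(e)]
--     for t in range(5):
--         members = [e for e in candidates if tier(e) == t]
--         if members:
--             for e in members:
--                 if is_up(e):
--                     return e.get("ip_address")
--             return members[0].get("ip_address")
--     return None
-- ===== Notes on version B (the rewrite author's own statement) =====
-- stated objective: alternative
-- what changed: Replaces A's per-entry (category, status) score tuple plus stable sort with a direct scan of the five priority tiers in order, returning the first up member of the best non-empty tier (or its first member), so no sort is performed.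
import Mathlib
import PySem

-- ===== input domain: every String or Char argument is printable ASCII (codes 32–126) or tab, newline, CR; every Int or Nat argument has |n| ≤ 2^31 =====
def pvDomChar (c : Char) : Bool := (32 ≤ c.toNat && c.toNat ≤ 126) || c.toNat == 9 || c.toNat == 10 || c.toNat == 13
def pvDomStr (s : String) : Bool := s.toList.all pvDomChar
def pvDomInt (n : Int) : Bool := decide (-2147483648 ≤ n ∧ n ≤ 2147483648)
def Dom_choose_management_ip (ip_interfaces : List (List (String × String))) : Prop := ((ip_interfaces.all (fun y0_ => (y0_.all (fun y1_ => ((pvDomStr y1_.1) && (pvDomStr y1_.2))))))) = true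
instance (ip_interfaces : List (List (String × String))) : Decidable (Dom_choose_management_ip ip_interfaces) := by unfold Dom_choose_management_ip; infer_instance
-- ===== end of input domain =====

-- B replaces A's per-entry score tuple + stable sort by a direct scan of the five
-- priority tiers in order (first up member of the best non-empty tier, else its first
-- member); objective: alternative decomposition, same results.

-- ===== PORT A =====

-- iface.get("ip_address") and iface["ip_address"].lower() not in {"unassigned","0.0.0.0"}
def aCandidate (iface : List (String × String)) : Bool :=
  match (PySem.Dict.mk iface).get? "ip_address" with
  | none => false
  | some ip => !(ip == "") && !(["unassigned", "0.0.0.0"].contains (PySem.Str.lower ip))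

-- first component of score(entry)
def aCat (entry : List (String × String)) : Int :=
  let name := PySem.Str.lower ((PySem.Dict.mk entry).getD "interface" "")
  if name == "mgmt0" || name == "management0" then 0
  else if PySem.Str.startswith name "vlan102" then 1
  else if PySem.Str.startswith name "vlan1" then 2
  else if PySem.Str.startswith name "vlan" then 3
  else 4

-- second component of score(entry) (status_rank)
def aRank (entry : List (String × String)) : Int :=
  let status := PySem.Str.lower ((PySem.Dict.mk entry).getD "status" "")
  if PySem.Str.startswith status "up" then 0 else 1

def choose_management_ip (ip_interfaces : List (List (String × String))) : Option String :=
  let candidates := ip_interfaces.filter aCandidate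
  if candidates = [] then none
  else
    match PySem.List.sorted2 candidates aCat aRank with
    | [] => none  -- unreachable totality guard: sorted of a non-empty list is non-empty
    | m :: _ => (PySem.Dict.mk m).get? "ip_address"

-- ===== PORT B =====

def bCandidate (e : List (String × String)) : Bool :=
  match (PySem.Dict.mk e).get? "ip_address" with
  | none => false
  | some ip =>
    if ip == "" then false
    else
      let low := PySem.Str.lower ip
      !(low == "unassigned") && !(low == "0.0.0.0")

def bTier (e : List (String × String)) : Int :=
  let name := PySem.Str.lower ((PySem.Dict.mk e).getD "interface" "")
  if name == "mgmt0" || name == "management0" then 0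
  else if PySem.Str.startswith name "vlan102" then 1
  else if PySem.Str.startswith name "vlan1" then 2
  else if PySem.Str.startswith name "vlan" then 3
  else 4

def bUp (e : List (String × String)) : Bool :=
  PySem.Str.startswith (PySem.Str.lower ((PySem.Dict.mk e).getD "status" "")) "up"

-- the 'for t in range(5)' loop over the tier list
def bScan (cands : List (List (String × String))) : List Int → Option String
  | [] => none
  | t :: ts =>
    match cands.filter (fun e => bTier e == t) with
    | [] => bScan cands ts
    | m :: rest =>
      match (m :: rest).find? bUp with
      | some e => (PySem.Dict.mk e).get? "ip_address"
      | none => (PySem.Dict.mk m).get? "ip_address"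

def choose_management_ip_alt (ip_interfaces : List (List (String × String))) : Option String :=
  bScan (ip_interfaces.filter bCandidate) (PySem.List.pyRange 0 5 1)

-- ===== PRECONDITION & SPEC =====
def Spec_choose_management_ip (ip_interfaces : List (List (String × String))) (out : Option String) : Prop := out = choose_management_ip_alt ip_interfaces
instance (ip_interfaces : List (List (String × String))) (out : Option String) : Decidable (Spec_choose_management_ip ip_interfaces out) := by unfold Spec_choose_management_ip; infer_instance

-- ===== CLAIM (what is proved, stated in full; the proofs are below) =====
def Claim_equal_choose_management_ip : Prop := ∀ (ip_interfaces : List (List (String × String))), Dom_choose_management_ip ip_interfaces → Spec_choose_management_ip ip_interfaces (choose_management_ip ip_interfaces)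

-- ===== LEMMAS AND PROOFS =====

-- combined scalar key: lex order on (aCat, aRank) with aRank ∈ {0,1} is < on 2*cat+rank
def pvK (e : List (String × String)) : Int := 2 * aCat e + aRank e

-- the comparison sorted2 inserts by
def pvLt (e f : List (String × String)) : Bool :=
  decide (aCat e < aCat f) || (!decide (aCat f < aCat e) && decide (aRank e < aRank f))

-- keep earlier element x unless the previously found best m is strictly smaller
def pvPick (x : List (String × String)) : Option (List (String × String)) → List (String × String)
  | none => x
  | some m => if pvK m < pvK x then m else x

-- first element with minimal pvK (earlier wins ties)
def pvBest : List (List (String × String)) → Option (List (String × String))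
  | [] => none
  | x :: xs => some (pvPick x (pvBest xs))

lemma aRank_mem (e : List (String × String)) : aRank e = 0 ∨ aRank e = 1 := by
  unfold aRank; simp only []; split_ifs <;> simp

lemma aCat_mem (e : List (String × String)) :
    aCat e = 0 ∨ aCat e = 1 ∨ aCat e = 2 ∨ aCat e = 3 ∨ aCat e = 4 := by
  unfold aCat; simp only []; split_ifs <;> simp

lemma bTier_eq_aCat : bTier = aCat := rfl

lemma aRank_eq_bUp (e : List (String × String)) : aRank e = if bUp e then 0 else 1 := rfl

lemma pvLt_eq_decide (e f : List (String × String)) : pvLt e f = decide (pvK e < pvK f) := by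
  unfold pvLt pvK
  rcases aRank_mem e with h1 | h1 <;> rcases aRank_mem f with h2 | h2 <;>
    rw [h1, h2] <;>
    by_cases h3 : aCat e < aCat f <;> by_cases h4 : aCat f < aCat e <;>
    simp [h3, h4] <;> omega

lemma head?_insertBy (lt : (List (String × String)) → (List (String × String)) → Bool)
    (x : List (String × String)) (acc : List (List (String × String))) :
    (PySem.List.insertBy lt x acc).head? =
      some (match acc with | [] => x | m :: _ => if lt x m then x else m) := by
  cases acc with
  | nil => rfl
  | cons m t => simp only [PySem.List.insertBy]; split <;> simp_all

lemma head?_foldl_insertBy (lt : (List (String × String)) → (List (String × String)) → Bool)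
    (xs acc : List (List (String × String))) :
    (xs.foldl (fun a x => PySem.List.insertBy lt x a) acc).head? =
      xs.foldl (fun o x =>
        match o with
        | none => some x
        | some m => some (if lt x m then x else m)) acc.head? := by
  induction xs generalizing acc with
  | nil => rfl
  | cons x t ih =>
    simp only [List.foldl_cons]
    rw [ih, head?_insertBy]
    cases acc <;> rfl

lemma pvBest_mem {xs : List (List (String × String))} {m : List (String × String)}
    (h : pvBest xs = some m) : m ∈ xs := by
  induction xs generalizing m with
  | nil => simp [pvBest] at h
  | cons x t ih =>
    simp only [pvBest] at h
    injection h with h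
    cases hb : pvBest t with
    | none =>
      rw [hb] at h
      simp only [pvPick] at h
      rw [← h]
      exact List.mem_cons_self ..
    | some b =>
      rw [hb] at h
      simp only [pvPick] at h
      by_cases hlt : pvK b < pvK x
      · rw [if_pos hlt] at h
        rw [← h]
        exact List.mem_cons_of_mem _ (ih hb)
      · rw [if_neg hlt] at h
        rw [← h]
        exact List.mem_cons_self ..

lemma foldl_min_eq_pvBest (xs : List (List (String × String)))
    (o : Option (List (String × String))) :
    xs.foldl (fun o x =>
        match o with
        | none => some x
        | some m => some (if pvLt x m then x else m)) o =
      (match o with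
       | none => pvBest xs
       | some a => some (pvPick a (pvBest xs))) := by
  induction xs generalizing o with
  | nil => cases o <;> rfl
  | cons x t ih =>
    simp only [List.foldl_cons]
    rw [ih]
    cases o with
    | none => rfl
    | some a =>
      show some (pvPick (if pvLt x a then x else a) (pvBest t)) =
        some (pvPick a (pvBest (x :: t)))
      rw [pvLt_eq_decide]
      cases hb : pvBest t with
      | none =>
        simp only [pvBest, hb, pvPick, decide_eq_true_eq]
      | some b =>
        simp only [pvBest, hb, pvPick, decide_eq_true_eq]
        split_ifs <;> first | rfl | (exfalso; omega)

lemma sorted2_eq_foldl (xs : List (List (String × String))) :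
    PySem.List.sorted2 xs aCat aRank false =
      xs.foldl (fun acc x => PySem.List.insertBy pvLt x acc) [] := rfl

lemma head?_sorted2 (xs : List (List (String × String))) :
    (PySem.List.sorted2 xs aCat aRank false).head? = pvBest xs := by
  rw [sorted2_eq_foldl, head?_foldl_insertBy, foldl_min_eq_pvBest]
  rfl

lemma pvBest_first (pre suf : List (List (String × String))) (m : List (String × String))
    (hsuf : ∀ y ∈ suf, pvK m ≤ pvK y) :
    (∀ y ∈ pre, pvK m < pvK y) → pvBest (pre ++ m :: suf) = some m := by
  induction pre with
  | nil =>
    intro _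
    simp only [List.nil_append, pvBest]
    cases hb : pvBest suf with
    | none => simp [pvPick]
    | some b =>
      have hle := hsuf b (pvBest_mem hb)
      simp [pvPick, not_lt.mpr hle]
  | cons p pre' ih =>
    intro hpre
    have ih' := ih (fun y hy => hpre y (List.mem_cons_of_mem _ hy))
    simp only [List.cons_append, pvBest, ih']
    simp [pvPick, hpre p (List.mem_cons_self ..)]

lemma find?_filter_general (l : List (List (String × String)))
    (p q : (List (String × String)) → Bool) :
    (l.filter p).find? q = l.find? (fun x => p x && q x) := by
  induction l with
  | nil => rfl
  | cons x t ih => by_cases h : p x <;> by_cases h2 : q x <;> simp [h, h2, ih]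

-- the tier scan computes (pvBest cands)'s ip, given every candidate's tier is still ahead
lemma bScan_eq (ts : List Int) (cands : List (List (String × String)))
    (hpw : ts.Pairwise (· < ·)) (hmem : ∀ y ∈ cands, aCat y ∈ ts) :
    bScan cands ts =
      match pvBest cands with
      | none => none
      | some m => (PySem.Dict.mk m).get? "ip_address" := by
  induction ts generalizing cands with
  | nil =>
    have : cands = [] := List.eq_nil_iff_forall_not_mem.mpr (fun y hy => by simpa using hmem y hy)
    subst this; rfl
  | cons t ts ih =>
    rw [bScan]
    have hts : ∀ t' ∈ ts, t < t' := (List.pairwise_cons.mp hpw).1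
    cases hf : cands.filter (fun e => bTier e == t) with
    | nil =>
      have hnone : ∀ y ∈ cands, aCat y ≠ t := by
        intro y hy heq
        have := List.filter_eq_nil_iff.mp hf y hy
        simp [bTier_eq_aCat, heq] at this
      have hmem' : ∀ y ∈ cands, aCat y ∈ ts := by
        intro y hy
        rcases List.mem_cons.mp (hmem y hy) with h | h
        · exact absurd h (hnone y hy)
        · exact h
      exact ih cands (List.pairwise_cons.mp hpw).2 hmem'
    | cons m rest =>
      -- every candidate has tier ≥ t
      have hget : ∀ y ∈ cands, t ≤ aCat y := by
        intro y hy
        rcases List.mem_cons.mp (hmem y hy) with h | h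
        · omega
        · exact le_of_lt (hts _ h)
      cases hfind : (m :: rest).find? bUp with
      | some e =>
        -- e is the first candidate with tier t and an up status
        have hfe : cands.find? (fun x => (bTier x == t) && bUp x) = some e := by
          rw [← find?_filter_general, hf, hfind]
        rw [List.find?_eq_some_iff_append] at hfe
        obtain ⟨hpe, pre, suf, hdec, hprenot⟩ := hfe
        have hcat_e : aCat e = t := by
          have := (Bool.and_eq_true ..).mp hpe
          simpa [bTier_eq_aCat] using this.1
        have hup_e : bUp e = true := ((Bool.and_eq_true ..).mp hpe).2
        have hKe : pvK e = 2 * t := by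
          unfold pvK; rw [aRank_eq_bUp, hup_e, hcat_e]; simp
        have hbest : pvBest cands = some e := by
          rw [hdec]
          apply pvBest_first
          · -- everything after e has key ≥ 2t
            intro y hy
            have hyc : y ∈ cands := by
              rw [hdec]; exact List.mem_append_right _ (List.mem_cons_of_mem _ hy)
            have := hget y hyc
            rw [hKe]; unfold pvK
            rcases aRank_mem y with hr | hr <;> omega
          · -- everything before e has key > 2t
            intro y hy
            have hyc : y ∈ cands := by rw [hdec]; exact List.mem_append_left _ hy
            have hnp := hprenot y hy
            simp only [Bool.not_eq_eq_eq_not, Bool.not_true, Bool.and_eq_false_iff] at hnp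
            have hyge := hget y hyc
            rw [hKe]
            unfold pvK
            rcases aRank_mem y with hr | hr <;> rw [hr]
            · -- rank 0 means up, so its tier cannot be t
              have hyt : ¬ (aCat y = t) := by
                intro hc
                rcases hnp with h | h
                · rw [bTier_eq_aCat] at h; simp [hc] at h
                · rw [aRank_eq_bUp, h] at hr; simp at hr
              omega
            · omega
        rw [hbest]
        show (match List.find? bUp (m :: rest) with
              | some e => (PySem.Dict.mk e).get? "ip_address"
              | none => (PySem.Dict.mk m).get? "ip_address") =
          (PySem.Dict.mk e).get? "ip_address"
        rw [hfind]
      | none =>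
        -- no up member in tier t: the first tier-t candidate wins
        have hno_up : ∀ x ∈ m :: rest, bUp x = false := by
          intro x hx
          have := List.find?_eq_none.mp hfind x hx
          simpa using this
        obtain ⟨pre, suf, hdec, hprenot, hpm, hrest⟩ := List.filter_eq_cons_iff.mp hf
        have hcat_m : aCat m = t := by simpa [bTier_eq_aCat] using hpm
        have hup_m : bUp m = false := hno_up m (List.mem_cons_self ..)
        have hKm : pvK m = 2 * t + 1 := by
          unfold pvK; rw [aRank_eq_bUp, hup_m, hcat_m]; simp
        have hbest : pvBest cands = some m := by
          rw [hdec]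
          apply pvBest_first
          · -- everything after m has key ≥ 2t+1
            intro y hy
            have hyc : y ∈ cands := by
              rw [hdec]; exact List.mem_append_right _ (List.mem_cons_of_mem _ hy)
            have hyge := hget y hyc
            rw [hKm]; unfold pvK
            by_cases hc : aCat y = t
            · -- y is in the filtered tier, hence not up, rank 1
              have hyf : y ∈ cands.filter (fun e => bTier e == t) :=
                List.mem_filter.mpr ⟨hyc, by simp [bTier_eq_aCat, hc]⟩
              rw [hf] at hyf
              rw [aRank_eq_bUp, hno_up y hyf, hc]
              simp
            · rcases aRank_mem y with hr | hr <;> omega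
          · -- everything before m is not of tier t, so key ≥ 2t+2
            intro y hy
            have hyc : y ∈ cands := by rw [hdec]; exact List.mem_append_left _ hy
            have hnp := hprenot y hy
            have hyt : aCat y ≠ t := by
              intro hc; rw [bTier_eq_aCat] at hnp; simp [hc] at hnp
            have := hget y hyc
            rw [hKm]; unfold pvK
            rcases aRank_mem y with hr | hr <;> omega
        rw [hbest]
        show (match List.find? bUp (m :: rest) with
              | some e => (PySem.Dict.mk e).get? "ip_address"
              | none => (PySem.Dict.mk m).get? "ip_address") =
          (PySem.Dict.mk m).get? "ip_address"
        rw [hfind]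

lemma candidate_eq : bCandidate = aCandidate := by
  funext e
  unfold aCandidate bCandidate
  cases (PySem.Dict.mk e).get? "ip_address" with
  | none => rfl
  | some ip =>
    by_cases h : ip = ""
    · simp [h]
    · simp only [List.contains_cons, List.contains_nil, Bool.or_false, Bool.not_or, beq_iff_eq, h]
      simp [h, BEq.comm]

-- ===== VERDICT (by name: the statement is the Claim_ definition above) =====
theorem choose_management_ip_spec : Claim_equal_choose_management_ip := by
  intro xs _
  unfold Spec_choose_management_ip choose_management_ip choose_management_ip_alt
  rw [candidate_eq]
  set cands := xs.filter aCandidate with hc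
  have hrange : PySem.List.pyRange 0 5 1 = [0, 1, 2, 3, 4] := by decide
  have hscan := bScan_eq [0, 1, 2, 3, 4] cands (by decide)
    (fun y _ => by rcases aCat_mem y with h | h | h | h | h <;> simp [h])
  rw [hrange, hscan]
  by_cases hnil : cands = []
  · rw [if_pos hnil, hnil]
    rfl
  · rw [if_neg hnil]
    have hhead := head?_sorted2 cands
    cases hs : PySem.List.sorted2 cands aCat aRank with
    | nil =>
      -- impossible: sorted2 of a non-empty list is non-empty
      exfalso
      have hp := PySem.List.sorted2_perm cands aCat aRank false
      rw [hs] at hp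
      exact hnil hp.symm.eq_nil
    | cons m tl =>
      rw [hs] at hhead
      simp only [List.head?_cons] at hhead
      rw [← hhead]
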